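-- pv_equiv track=rewrite | github.com/gidedr44/Advent-of-code-2019 | advent_of_code_8.py | check_digits
-- ===== SOURCE A (Python) =====
-- def check_digits(num):
--     count = 0
--     for num1, num2 in zip(num, num[1:]):
--         if num1 == num2:
--             count += 1
--         else:
--             if count == 1:
--                 return True
--             count = 0
--     return count == 1
-- ===== SOURCE B (Python) =====
-- def check_digits(num):
--     items = list(num)
--     i, n = 0, len(items)
--     while i < n:
--         j = i
--         while j < n and items[j] == items[i]:
--             j += 1
--         if j - i == 2:
--             return True
--         i = j
--     return False
-- ===== Notes on version B (the rewrite author's own statement) =====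
-- stated objective: idiomatic
-- what changed: B scans maximal runs of equal elements (inner while advances past a whole run) and tests whether any run has length exactly 2, instead of A's pairwise zip scan with a running counter and boundary resets.
import Mathlib
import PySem

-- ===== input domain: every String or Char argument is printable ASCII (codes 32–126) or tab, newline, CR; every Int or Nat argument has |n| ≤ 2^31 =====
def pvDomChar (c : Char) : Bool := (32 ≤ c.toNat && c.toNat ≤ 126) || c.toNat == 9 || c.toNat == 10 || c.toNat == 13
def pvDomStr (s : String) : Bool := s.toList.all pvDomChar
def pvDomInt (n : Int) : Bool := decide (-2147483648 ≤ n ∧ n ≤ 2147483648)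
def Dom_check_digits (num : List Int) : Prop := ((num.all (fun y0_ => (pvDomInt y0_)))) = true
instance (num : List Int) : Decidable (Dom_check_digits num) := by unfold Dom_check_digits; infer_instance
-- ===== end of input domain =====

-- B replaces A's pairwise zip scan with running counter by a scan over maximal runs
-- of equal elements, returning whether any run has length exactly 2 (idiomatic).

-- ===== PORT A =====
-- A's loop over zip(num, num[1:]) carrying `count`; `return True` is the first branch,
-- the trailing `return count == 1` is the base case.
def checkDigitsGo (count : Int) : List (Int × Int) → Bool
  | [] => count == 1
  | (n1, n2) :: rest =>
    if n1 == n2 then checkDigitsGo (count + 1) rest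
    else if count == 1 then true
    else checkDigitsGo 0 rest

def check_digits (num : List Int) : Bool :=
  checkDigitsGo 0 (List.zip num (num.drop 1))

-- ===== PORT B =====
-- Source B's outer while: take the maximal run starting at position i (inner while = takeWhile),
-- return True if its length is exactly 2, else continue after the run.
def check_digits_alt (num : List Int) : Bool :=
  match num with
  | [] => false
  | x :: xs =>
    if (xs.takeWhile (· == x)).length + 1 == 2 then true
    else check_digits_alt (xs.dropWhile (· == x))
termination_by num.length
decreasing_by
  simp only [List.length_cons]
  exact Nat.lt_succ_of_le (List.length_dropWhile_le _ _)

-- ===== PRECONDITION & SPEC =====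
def Spec_check_digits (num : List Int) (out : Bool) : Prop := out = check_digits_alt num
instance (num : List Int) (out : Bool) : Decidable (Spec_check_digits num out) := by unfold Spec_check_digits; infer_instance

-- ===== CLAIM (what is proved, stated in full; the proofs are below) =====
def Claim_equal_check_digits : Prop := ∀ (num : List Int), Dom_check_digits num → Spec_check_digits num (check_digits num)

-- ===== LEMMAS AND PROOFS =====

theorem checkDigitsGo_run (xs : List Int) (x : Int) (c : Int) :
    checkDigitsGo c (List.zip (x :: xs) xs) =
      ((c + 1 + (xs.takeWhile (· == x)).length == 2) ||
        check_digits_alt (xs.dropWhile (· == x))) := by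
  match xs with
    | [] =>
      simp [checkDigitsGo, check_digits_alt]
      omega
    | y :: ys =>
      by_cases hxy : x = y
      · subst hxy
        have := checkDigitsGo_run ys x (c + 1)
        simp only [List.zip_cons_cons, checkDigitsGo, beq_self_eq_true, if_true] at *
        rw [this]
        simp [List.takeWhile, List.dropWhile]
        have h3 : c + 1 + 1 + ((List.takeWhile (fun x_1 => x_1 == x) ys).length : Int)
            = c + 1 + (((List.takeWhile (fun x_1 => x_1 == x) ys).length : Int) + 1) := by ring
        rw [h3]
      · have hne : (x == y) = false := by simp [hxy]
        have hne' : (y == x) = false := by simp [Ne.symm hxy]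
        have hy := checkDigitsGo_run ys y 0
        have halt : check_digits_alt (y :: ys) =
            (((ys.takeWhile (· == y)).length + 1 == 2) ||
              check_digits_alt (ys.dropWhile (· == y))) := by
          rw [check_digits_alt]
          rcases h : ((ys.takeWhile (· == y)).length + 1 == 2) with _ | _ <;> simp [h]
        simp only [List.zip_cons_cons, checkDigitsGo, hne, Bool.false_eq_true, if_false,
          List.takeWhile_cons, List.dropWhile_cons, hne', List.length_nil, Nat.cast_zero,
          add_zero, halt]
        by_cases hc : c = 1
        · subst hc; simp
        · have hcb : (c == 1) = false := by simp [hc]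
          rw [hcb]
          simp only [Bool.false_eq_true, if_false]
          rw [hy]
          have hc2 : ((c + 1 : Int) == 2) = false := by simp; omega
          rw [hc2]
          simp only [Bool.false_or]
          congr 1
          by_cases ht : (ys.takeWhile (· == y)).length = 1 <;> simp [ht] <;> omega
termination_by xs.length
decreasing_by all_goals simp

-- ===== VERDICT (by name: the statement is the Claim_ definition above) =====
theorem check_digits_spec : Claim_equal_check_digits := by
  intro num _
  unfold Spec_check_digits check_digits
  match num with
  | [] => simp [checkDigitsGo, check_digits_alt]
  | x :: xs =>
    rw [List.drop_one, List.tail_cons, checkDigitsGo_run]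
    rw [show check_digits_alt (x :: xs) =
        (((xs.takeWhile (· == x)).length + 1 == 2) ||
          check_digits_alt (xs.dropWhile (· == x))) by
      rw [check_digits_alt]
      rcases h : ((xs.takeWhile (· == x)).length + 1 == 2) with _ | _ <;> simp [h]]
    congr 1
    simp
    omega
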